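-- pv_equiv track=rewrite | github.com/vinchinzu/euler | python/951.py | solve
-- ===== SOURCE A (Python) =====
-- import math
--
-- def nCr(n, r):
--     return math.factorial(n) // (math.factorial(r) * math.factorial(n - r))
--
-- def solve(n):
--     """
--     Calculates F(n) for the given n.
--     F(n) = C(2n, n) - (Number of configurations with no run of length 2)
--     """
--
--     # dp[state] = count
--     # state is (r, b, length, color)
--     # color: 0 for Red, 1 for Black
--     # We only care about avoiding run length == 2 when a run finishes.
--
--     # Optimization: Iterate layer by layer based on total cards used (r+b).
--     # Since we only need current layer to compute next, we can save memory, though for n=26 full dict is fine.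
--
--     dp = {}
--     # Initial states: 1 Red card or 1 Black card
--     dp[(1, 0, 1, 0)] = 1
--     dp[(0, 1, 1, 1)] = 1
--
--     # Iterate total cards k from 1 to 2n-1
--     for k in range(1, 2 * n):
--         new_dp = {}
--         for state, count in dp.items():
--             r, b, length, color = state
--
--             # Try adding Red (0)
--             if r + 1 <= n:
--                 if color == 0:
--                     # Extend Red run
--                     new_state = (r + 1, b, length + 1, 0)
--                     new_dp[new_state] = new_dp.get(new_state, 0) + count
--                 else:
--                     # Switch from Black to Red
--                     # Check if finished Black run is valid (len != 2)
--                     if length != 2: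
--                         new_state = (r + 1, b, 1, 0)
--                         new_dp[new_state] = new_dp.get(new_state, 0) + count
--
--             # Try adding Black (1)
--             if b + 1 <= n:
--                 if color == 1:
--                     # Extend Black run
--                     new_state = (r, b + 1, length + 1, 1)
--                     new_dp[new_state] = new_dp.get(new_state, 0) + count
--                 else:
--                     # Switch from Red to Black
--                     # Check if finished Red run is valid (len != 2)
--                     if length != 2:
--                         new_state = (r, b + 1, 1, 1)
--                         new_dp[new_state] = new_dp.get(new_state, 0) + count
--         dp = new_dp
--
--     # Sum valid final states
--     bad_count = 0
--     for state, count in dp.items():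
--         r, b, length, color = state
--         # We only care about states that used all cards
--         if r == n and b == n:
--             # The final run must also not be length 2
--             if length != 2:
--                 bad_count += count
--
--     total = nCr(2 * n, n)
--     fair = total - bad_count
--     return fair
-- ===== SOURCE B (Python) =====
-- import math
--
--
-- def nCr(n, r):
--     return math.factorial(n) // (math.factorial(r) * math.factorial(n - r))
--
--
-- def solve(n):
--     """
--     F(n) = C(2n, n) - (number of arrangements with no run of length exactly 2).
--
--     Symmetry-reduced array DP: by red/black symmetry, the count of states
--     ending in a black run equals the red-ending count with colours swapped,
--     so only red-ending states are kept -- three arrays indexed by the red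
--     count r (run-length classes 1, 2, >=3; black count is implicit).
--     O(n^2) arithmetic instead of A's O(n^3) dict DP.
--     """
--     def g(f, i):  # f[i] with 0 outside the index range 0..n
--         return f[i] if 0 <= i <= n else 0
--
--     f1 = [1 if r == 1 else 0 for r in range(n + 1)]  # one red card placed
--     f2 = [0] * (n + 1)
--     f3 = [0] * (n + 1)
--     for k in range(1, 2 * n):  # k = cards currently placed
--         # switch black->red (finished black run of class 1 or >=3 had k-r+1 blacks
--         # = f* with k-r+1 reds by symmetry); extend red run 1->2, 2/>=3 -> >=3
--         f1, f2, f3 = ([g(f1, k - r + 1) + g(f3, k - r + 1) for r in range(n + 1)],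
--                       [g(f1, r - 1) for r in range(n + 1)],
--                       [g(f2, r - 1) + g(f3, r - 1) for r in range(n + 1)])
--
--     bad = 2 * (g(f1, n) + g(f3, n))  # final run not of length 2; factor 2 by symmetry
--     return nCr(2 * n, n) - bad
-- ===== Notes on version B (the rewrite author's own statement) =====
-- stated objective: faster
-- what changed: Replaces the dict-of-states DP over (r,b,run-length,color) by a symmetry-reduced array DP: red/black symmetry halves the state space to red-ending states only, run length is capped at the classes 1,2,>=3, and the black count is implicit, giving three length-(n+1) integer arrays updated per layer (O(n^2)) instead of A's O(n^3) dict states.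
import Mathlib
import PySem

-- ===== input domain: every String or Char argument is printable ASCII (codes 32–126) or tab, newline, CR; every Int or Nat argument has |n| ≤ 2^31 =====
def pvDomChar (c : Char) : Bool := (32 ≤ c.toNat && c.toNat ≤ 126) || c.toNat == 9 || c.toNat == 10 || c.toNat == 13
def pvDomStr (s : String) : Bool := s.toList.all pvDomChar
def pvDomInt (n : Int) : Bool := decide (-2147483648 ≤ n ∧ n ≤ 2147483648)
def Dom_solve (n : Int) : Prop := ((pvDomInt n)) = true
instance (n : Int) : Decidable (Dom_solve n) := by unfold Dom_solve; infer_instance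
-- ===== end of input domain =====

-- B replaces A's dict DP over (r, b, run-length, color) states with a symmetry-reduced
-- array DP (three length-(n+1) integer arrays, red-ending states only, run length capped
-- at the classes 1/2/>=3); an asymptotically smaller state space.

-- ===== PORT A =====
-- math.factorial ported as Nat.factorial (exact for nonnegative arguments;
-- Python raises ValueError for negative arguments, excluded by Pre_solve)
def pyNCr (n r : Int) : Int :=
  PySem.Int.floordiv (Nat.factorial n.toNat)
    ((Nat.factorial r.toNat : Int) * (Nat.factorial (n - r).toNat : Int))

-- the body of A's 'for state, count in dp.items()' loop, building new_dp
-- (Python's dict is hash-based; it is ported as Std.HashMap — same get/insert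
-- value semantics with unique keys; A's final items-fold is a sum over the
-- entries, which is independent of iteration order)
def stepA (n : Int) (dp : Std.HashMap (Int × Int × Int × Int) Int) :
    Std.HashMap (Int × Int × Int × Int) Int :=
  dp.toList.foldl (fun nd sv =>
    let r := sv.1.1; let b := sv.1.2.1; let length := sv.1.2.2.1; let color := sv.1.2.2.2
    let count := sv.2
    -- Try adding Red (0)
    let nd :=
      if r + 1 ≤ n then
        if color = 0 then
          nd.insert (r + 1, b, length + 1, 0) (nd.getD (r + 1, b, length + 1, 0) 0 + count)
        else if length ≠ 2 then
          nd.insert (r + 1, b, 1, 0) (nd.getD (r + 1, b, 1, 0) 0 + count)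
        else nd
      else nd
    -- Try adding Black (1)
    if b + 1 ≤ n then
      if color = 1 then
        nd.insert (r, b + 1, length + 1, 1) (nd.getD (r, b + 1, length + 1, 1) 0 + count)
      else if length ≠ 2 then
        nd.insert (r, b + 1, 1, 1) (nd.getD (r, b + 1, 1, 1) 0 + count)
      else nd
    else nd) ∅

def solve (n : Int) : Int :=
  let dp0 : Std.HashMap (Int × Int × Int × Int) Int :=
    ((∅ : Std.HashMap (Int × Int × Int × Int) Int).insert (1, 0, 1, 0) 1).insert (0, 1, 1, 1) 1
  let dp := (PySem.List.pyRange 1 (2 * n) 1).foldl (fun dp _k => stepA n dp) dp0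
  let bad := dp.toList.foldl (fun acc sv =>
    if sv.1.1 = n ∧ sv.1.2.1 = n then
      if sv.1.2.2.1 ≠ 2 then acc + sv.2 else acc
    else acc) 0
  pyNCr (2 * n) n - bad

-- ===== PORT B =====
-- B's helper g(f, i): f[i] inside the index range 0..n, 0 outside
def bGet (n : Int) (f : List Int) (i : Int) : Int :=
  if 0 ≤ i ∧ i ≤ n then PySem.List.pyGetD f i 0 else 0

-- range(n + 1)
def bRange (n : Int) : List Int := PySem.List.pyRange 0 (n + 1) 1

-- the simultaneous assignment of B's loop body at card count k
def bStep (n k : Int) (f : List Int × List Int × List Int) :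
    List Int × List Int × List Int :=
  ((bRange n).map (fun r => bGet n f.1 (k - r + 1) + bGet n f.2.2 (k - r + 1)),
   (bRange n).map (fun r => bGet n f.1 (r - 1)),
   (bRange n).map (fun r => bGet n f.2.1 (r - 1) + bGet n f.2.2 (r - 1)))

def solve_alt (n : Int) : Int :=
  let f0 : List Int × List Int × List Int :=
    ((bRange n).map (fun r => if r = 1 then (1 : Int) else 0),
     List.replicate (n + 1).toNat (0 : Int),
     List.replicate (n + 1).toNat (0 : Int))
  let f := (PySem.List.pyRange 1 (2 * n) 1).foldl (fun f k => bStep n k f) f0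
  let bad := 2 * (bGet n f.1 n + bGet n f.2.2 n)
  pyNCr (2 * n) n - bad

-- ===== PRECONDITION & SPEC =====
-- Python's math.factorial raises ValueError for negative arguments, so A raises for n < 0.
def Pre_solve (n : Int) : Prop := 0 ≤ n
instance (n : Int) : Decidable (Pre_solve n) := by unfold Pre_solve; infer_instance
def pvWitness_solve : Int := 3

def Spec_solve (n : Int) (out : Int) : Prop := out = solve_alt n
instance (n : Int) (out : Int) : Decidable (Spec_solve n out) := by unfold Spec_solve; infer_instance

-- ===== CLAIM (what is proved, stated in full; the proofs are below) =====
def Claim_equal_solve : Prop := ∀ (n : Int), Dom_solve n → Pre_solve n → Spec_solve n (solve n)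

-- ===== LEMMAS AND PROOFS =====

-- generic: insert-add v at each target in turn (new_dp[t] = new_dp.get(t,0)+v)
def addInto {α : Type} [BEq α] [Hashable α] (d : Std.HashMap α Int) (ts : List α) (v : Int) :
    Std.HashMap α Int :=
  ts.foldl (fun d t => d.insert t (d.getD t 0 + v)) d

theorem getD_addInto {α : Type} [BEq α] [Hashable α] [LawfulBEq α] [LawfulHashable α]
    (d : Std.HashMap α Int) (ts : List α) (v : Int) (t : α) :
    (addInto d ts v).getD t 0 = d.getD t 0 + (ts.count t : Int) * v := by
  induction ts generalizing d with
  | nil => simp [addInto]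
  | cons t' ts ih =>
    simp only [addInto, List.foldl_cons] at *
    rw [ih]
    rw [Std.HashMap.getD_insert]
    by_cases h : t = t'
    · subst h; simp; ring
    · simp [Ne.symm h]

theorem mem_addInto {α : Type} [BEq α] [Hashable α] [LawfulBEq α] [LawfulHashable α]
    (d : Std.HashMap α Int) (ts : List α) (v : Int) (x : α) :
    x ∈ addInto d ts v ↔ x ∈ d ∨ x ∈ ts := by
  induction ts generalizing d with
  | nil => simp [addInto]
  | cons t' ts ih =>
    simp only [addInto, List.foldl_cons] at *
    rw [ih]
    simp [Std.HashMap.mem_insert]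
    tauto

theorem getD_buildF {α : Type} [BEq α] [Hashable α] [LawfulBEq α] [LawfulHashable α]
    (l : List (α × Int)) (moves : α → List α) (d0 : Std.HashMap α Int) (t : α) :
    (l.foldl (fun nd sv => addInto nd (moves sv.1) sv.2) d0).getD t 0
      = d0.getD t 0 + (l.map (fun sv => ((moves sv.1).count t : Int) * sv.2)).sum := by
  induction l generalizing d0 with
  | nil => simp
  | cons sv l ih =>
    simp only [List.foldl_cons, List.map_cons, List.sum_cons]
    rw [ih, getD_addInto]
    ring

theorem mem_buildF {α : Type} [BEq α] [Hashable α] [LawfulBEq α] [LawfulHashable α]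
    (l : List (α × Int)) (moves : α → List α) (d0 : Std.HashMap α Int) (x : α) :
    x ∈ l.foldl (fun nd sv => addInto nd (moves sv.1) sv.2) d0
      ↔ x ∈ d0 ∨ ∃ sv ∈ l, x ∈ moves sv.1 := by
  induction l generalizing d0 with
  | nil => simp
  | cons sv l ih =>
    simp only [List.foldl_cons]
    rw [ih]
    rw [mem_addInto]
    simp
    tauto

theorem fst_mem_of_mem_toList {α : Type} [BEq α] [Hashable α] [LawfulBEq α] [LawfulHashable α]
    {d : Std.HashMap α Int} {sv : α × Int} (h : sv ∈ d.toList) : sv.1 ∈ d := by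
  obtain ⟨k, v⟩ := sv
  have h2 := (Std.HashMap.mem_toList_iff_getKey?_eq_some_and_getElem?_eq_some).1 h
  by_contra hc
  rw [Std.HashMap.getElem?_eq_none hc] at h2
  exact absurd h2.2 (by simp)

theorem snd_eq_getD_of_mem_toList {α : Type} [BEq α] [Hashable α] [LawfulBEq α] [LawfulHashable α]
    {d : Std.HashMap α Int} {sv : α × Int} (h : sv ∈ d.toList) : sv.2 = d.getD sv.1 0 := by
  obtain ⟨k, v⟩ := sv
  have h2 := (Std.HashMap.mem_toList_iff_getKey?_eq_some_and_getElem?_eq_some).1 h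
  rw [Std.HashMap.getD_eq_getD_getElem?, h2.2]
  rfl

-- sum over the map's entries of f(key)*value = the same sum over any nodup key list
-- covering the keys where f doesn't vanish
theorem sum_toList_eq {α : Type} [BEq α] [Hashable α] [LawfulBEq α] [LawfulHashable α]
    [DecidableEq α]
    (d : Std.HashMap α Int) (f : α → Int) (L : List α) (hL : L.Nodup)
    (hcov : ∀ s ∈ d, f s ≠ 0 → s ∈ L) :
    (d.toList.map (fun sv => f sv.1 * sv.2)).sum = (L.map (fun s => f s * d.getD s 0)).sum := by
  have hstep1 : d.toList.map (fun sv => f sv.1 * sv.2)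
      = d.toList.map (fun sv => f sv.1 * d.getD sv.1 0) := by
    refine List.map_congr_left ?_
    intro sv hsv
    rw [snd_eq_getD_of_mem_toList hsv]
  have hstep2 : d.toList.map (fun sv => f sv.1 * d.getD sv.1 0)
      = (d.toList.map Prod.fst).map (fun s => f s * d.getD s 0) := by
    rw [List.map_map]
    rfl
  rw [hstep1, hstep2]
  have hKL : (d.toList.map Prod.fst).Nodup := by
    refine (List.pairwise_map).2 (List.Pairwise.imp ?_ Std.HashMap.distinct_keys_toList)
    intro a b hab
    exact beq_eq_false_iff_ne.1 hab
  have hKLmem : ∀ x, x ∈ d.toList.map Prod.fst ↔ x ∈ d := by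
    intro x
    constructor
    · intro hx
      obtain ⟨sv, hsv, rfl⟩ := List.mem_map.1 hx
      exact fst_mem_of_mem_toList hsv
    · intro hx
      refine List.mem_map.2 ⟨(x, d.getD x 0), ?_, rfl⟩
      exact (Std.HashMap.mem_toList_iff_getKey?_eq_some_and_getElem?_eq_some).2
        ⟨Std.HashMap.getKey?_eq_some hx, Std.HashMap.getElem?_eq_some_getD hx⟩
  have hg : ∀ (M : List α), M.Nodup → (M.map (fun k => f k * d.getD k 0)).sum
      = M.toFinset.sum (fun k => f k * d.getD k 0) := by
    intro M hM
    rw [List.sum_toFinset _ hM]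
  rw [hg _ hKL, hg L hL]
  have hz1 : ∀ x ∈ (d.toList.map Prod.fst).toFinset ∪ L.toFinset,
      x ∉ (d.toList.map Prod.fst).toFinset → f x * d.getD x 0 = 0 := by
    intro x _ hx
    simp only [List.mem_toFinset] at hx
    rw [Std.HashMap.getD_eq_fallback (fun hm => hx ((hKLmem x).2 hm))]
    ring
  have hz2 : ∀ x ∈ (d.toList.map Prod.fst).toFinset ∪ L.toFinset,
      x ∉ L.toFinset → f x * d.getD x 0 = 0 := by
    intro x hx hnx
    simp only [Finset.mem_union, List.mem_toFinset] at hx hnx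
    have hxk : x ∈ d := by
      rcases hx with hx | hx
      · exact (hKLmem x).1 hx
      · exact absurd hx hnx
    have : f x = 0 := by
      by_contra hf
      exact hnx (hcov x hxk hf)
    rw [this]; ring
  rw [Finset.sum_subset Finset.subset_union_left hz1,
      Finset.sum_subset Finset.subset_union_right hz2]

-- target lists of A's loop body for one source state
def movesA (n : Int) (s : Int × Int × Int × Int) : List (Int × Int × Int × Int) :=
  (if s.1 + 1 ≤ n then
     if s.2.2.2 = 0 then [(s.1 + 1, s.2.1, s.2.2.1 + 1, 0)]
     else if s.2.2.1 ≠ 2 then [(s.1 + 1, s.2.1, 1, 0)] else []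
   else []) ++
  (if s.2.1 + 1 ≤ n then
     if s.2.2.2 = 1 then [(s.1, s.2.1 + 1, s.2.2.1 + 1, 1)]
     else if s.2.2.1 ≠ 2 then [(s.1, s.2.1 + 1, 1, 1)] else []
   else [])

def nextA (n : Int) (d : Std.HashMap (Int × Int × Int × Int) Int) :
    Std.HashMap (Int × Int × Int × Int) Int :=
  d.toList.foldl (fun nd sv => addInto nd (movesA n sv.1) sv.2) ∅

theorem stepA_eq (n : Int) (dp : Std.HashMap (Int × Int × Int × Int) Int) :
    stepA n dp = nextA n dp := by
  unfold stepA nextA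
  apply PySem.List.foldl_congr_mem
  intro nd sv _
  obtain ⟨⟨r, b, l, c⟩, v⟩ := sv
  simp only [movesA, addInto]
  split_ifs <;> simp [List.foldl]

theorem mem_movesA {n : Int} {s t : Int × Int × Int × Int} (h : t ∈ movesA n s) :
      (s.2.2.2 = 0 ∧ s.1 < n ∧ t = (s.1 + 1, s.2.1, s.2.2.1 + 1, 0)) ∨
      (s.2.2.2 ≠ 0 ∧ s.2.2.1 ≠ 2 ∧ s.1 < n ∧ t = (s.1 + 1, s.2.1, 1, 0)) ∨
      (s.2.2.2 = 1 ∧ s.2.1 < n ∧ t = (s.1, s.2.1 + 1, s.2.2.1 + 1, 1)) ∨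
      (s.2.2.2 ≠ 1 ∧ s.2.2.1 ≠ 2 ∧ s.2.1 < n ∧ t = (s.1, s.2.1 + 1, 1, 1)) := by
  simp only [movesA, List.mem_append] at h
  split_ifs at h <;> simp_all

theorem recA_ext0 (n : Int) (d : Std.HashMap (Int × Int × Int × Int) Int)
    (r b l : Int) (hl : 2 ≤ l) :
    (nextA n d).getD (r, b, l, 0) 0
      = if r ≤ n then d.getD (r - 1, b, l - 1, 0) 0 else 0 := by
  unfold nextA
  rw [getD_buildF]
  simp only [Std.HashMap.getD_empty, zero_add]
  by_cases hr : r ≤ n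
  · rw [sum_toList_eq d (fun s => (List.count ((r : Int), b, l, (0 : Int)) (movesA n s) : Int)) [(r - 1, b, l - 1, 0)] (by simp) ?cov]
    case cov =>
      intro s hs hf
      have hmem : (r, b, l, 0) ∈ movesA n s := by
        by_contra hc
        apply hf
        show (List.count ((r : Int), b, l, (0 : Int)) (movesA n s) : Int) = 0
        simp [List.count_eq_zero.2 hc]
      obtain ⟨r', b', l', c'⟩ := s
      rcases mem_movesA hmem with ⟨h1, h2, h3⟩ | ⟨h1, h2, h3, h4⟩ | ⟨h1, h2, h3⟩ | ⟨h1, h2, h3, h4⟩ <;>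
        simp [Prod.mk.injEq] at * <;> omega
    · have hcnt : ((movesA n (r - 1, b, l - 1, 0)).count (r, b, l, 0)) = 1 := by
        simp only [movesA, List.count_append]
        have h1 : r - 1 + 1 = r := by ring
        have h2 : l - 1 + 1 = l := by ring
        rw [h1, h2]
        split_ifs <;> simp_all [Prod.mk.injEq]
      simp [hcnt, hr]
  · rw [List.sum_eq_zero, if_neg hr]
    intro x hx
    simp only [List.mem_map] at hx
    obtain ⟨sv, hsv, rfl⟩ := hx
    have : (movesA n sv.1).count (r, b, l, 0) = 0 := by
      rw [List.count_eq_zero]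
      intro hmem
      rcases mem_movesA hmem with ⟨h1, h2, h3⟩ | ⟨h1, h2, h3, h4⟩ | ⟨h1, h2, h3⟩ | ⟨h1, h2, h3, h4⟩ <;>
        simp [Prod.mk.injEq] at * <;> omega
    simp [this]

theorem recA_ext1 (n : Int) (d : Std.HashMap (Int × Int × Int × Int) Int)
    (r b l : Int) (hl : 2 ≤ l) :
    (nextA n d).getD (r, b, l, 1) 0
      = if b ≤ n then d.getD (r, b - 1, l - 1, 1) 0 else 0 := by
  unfold nextA
  rw [getD_buildF]
  simp only [Std.HashMap.getD_empty, zero_add]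
  by_cases hr : b ≤ n
  · rw [sum_toList_eq d (fun s => (List.count ((r : Int), b, l, (1 : Int)) (movesA n s) : Int)) [(r, b - 1, l - 1, 1)] (by simp) ?cov]
    case cov =>
      intro s hs hf
      have hmem : (r, b, l, 1) ∈ movesA n s := by
        by_contra hc
        apply hf
        show (List.count ((r : Int), b, l, (1 : Int)) (movesA n s) : Int) = 0
        simp [List.count_eq_zero.2 hc]
      obtain ⟨r', b', l', c'⟩ := s
      rcases mem_movesA hmem with ⟨h1, h2, h3⟩ | ⟨h1, h2, h3, h4⟩ | ⟨h1, h2, h3⟩ | ⟨h1, h2, h3, h4⟩ <;>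
        simp [Prod.mk.injEq] at * <;> omega
    · have hcnt : ((movesA n (r, b - 1, l - 1, 1)).count (r, b, l, 1)) = 1 := by
        simp only [movesA, List.count_append]
        have h1 : b - 1 + 1 = b := by ring
        have h2 : l - 1 + 1 = l := by ring
        rw [h1, h2]
        split_ifs <;> simp_all [Prod.mk.injEq]
      simp [hcnt, hr]
  · rw [List.sum_eq_zero, if_neg hr]
    intro x hx
    simp only [List.mem_map] at hx
    obtain ⟨sv, hsv, rfl⟩ := hx
    have : (movesA n sv.1).count (r, b, l, 1) = 0 := by
      rw [List.count_eq_zero]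
      intro hmem
      rcases mem_movesA hmem with ⟨h1, h2, h3⟩ | ⟨h1, h2, h3, h4⟩ | ⟨h1, h2, h3⟩ | ⟨h1, h2, h3, h4⟩ <;>
        simp [Prod.mk.injEq] at * <;> omega
    simp [this]

theorem recA_sw0 (n : Int) (d : Std.HashMap (Int × Int × Int × Int) Int)
    (M : Nat)
    (hshape : ∀ s ∈ d, 1 ≤ s.2.2.1 ∧ s.2.2.1 ≤ (M : Int) ∧ (s.2.2.2 = 0 ∨ s.2.2.2 = 1))
    (r b : Int) :
    (nextA n d).getD (r, b, 1, 0) 0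
      = if r ≤ n then
          ((List.range M).map (fun (i : Nat) =>
            if 1 + (i : Int) ≠ 2 then d.getD (r - 1, b, 1 + (i : Int), 1) 0 else 0)).sum
        else 0 := by
  unfold nextA
  rw [getD_buildF]
  simp only [Std.HashMap.getD_empty, zero_add]
  by_cases hr : r ≤ n
  · rw [sum_toList_eq d (fun s => (List.count ((r : Int), b, 1, (0 : Int)) (movesA n s) : Int))
        ((List.range M).map (fun (i : Nat) => ((r - 1 : Int), b, 1 + (i : Int), (1 : Int))))
        ?nod ?cov]
    case nod =>
      refine List.Nodup.map ?_ List.nodup_range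
      intro i j hij
      simp only [Prod.mk.injEq] at hij
      omega
    case cov =>
      intro s hs hf
      have hmem : (r, b, 1, 0) ∈ movesA n s := by
        by_contra hc
        apply hf
        show (List.count ((r : Int), b, 1, (0 : Int)) (movesA n s) : Int) = 0
        simp [List.count_eq_zero.2 hc]
      obtain ⟨hl1, hlM, hc01⟩ := hshape s hs
      obtain ⟨r', b', l', c'⟩ := s
      simp only at hl1 hlM hc01
      rcases mem_movesA hmem with h | h | h | h
      · exfalso
        obtain ⟨h1, h2, h3⟩ := h
        simp only [Prod.mk.injEq] at h3
        omega
      · obtain ⟨h1, h2, h3, h4⟩ := h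
        simp only at h1
        simp only [Prod.mk.injEq] at h4
        simp only [List.mem_map, List.mem_range]
        refine ⟨(l' - 1).toNat, by omega, ?_⟩
        simp only [Prod.mk.injEq]
        omega
      · exfalso
        obtain ⟨h1, h2, h3⟩ := h
        simp only [Prod.mk.injEq] at h3
        omega
      · exfalso
        obtain ⟨h1, h2, h3, h4⟩ := h
        simp only [Prod.mk.injEq] at h4
        omega
    · rw [List.map_map, if_pos hr]
      refine congrArg List.sum (List.map_congr_left ?_)
      intro i hi
      simp only [List.mem_range] at hi
      simp only [Function.comp_apply]
      have hcnt : (movesA n (r - 1, b, 1 + (i : Int), 1)).count (r, b, 1, 0)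
          = if 1 + (i : Int) ≠ 2 then 1 else 0 := by
        simp only [movesA, List.count_append]
        have h1 : r - 1 + 1 = r := by ring
        rw [h1]
        split_ifs <;> simp_all [Prod.mk.injEq]
      rw [hcnt]
      split_ifs <;> simp
  · rw [List.sum_eq_zero, if_neg hr]
    intro x hx
    simp only [List.mem_map] at hx
    obtain ⟨sv, hsv, rfl⟩ := hx
    have : (movesA n sv.1).count (r, b, 1, 0) = 0 := by
      rw [List.count_eq_zero]
      intro hmem
      rcases mem_movesA hmem with ⟨h1, h2, h3⟩ | ⟨h1, h2, h3, h4⟩ | ⟨h1, h2, h3⟩ | ⟨h1, h2, h3, h4⟩ <;>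
        simp [Prod.mk.injEq] at * <;> omega
    simp [this]

theorem recA_sw1 (n : Int) (d : Std.HashMap (Int × Int × Int × Int) Int)
    (M : Nat)
    (hshape : ∀ s ∈ d, 1 ≤ s.2.2.1 ∧ s.2.2.1 ≤ (M : Int) ∧ (s.2.2.2 = 0 ∨ s.2.2.2 = 1))
    (r b : Int) :
    (nextA n d).getD (r, b, 1, 1) 0
      = if b ≤ n then
          ((List.range M).map (fun (i : Nat) =>
            if 1 + (i : Int) ≠ 2 then d.getD (r, b - 1, 1 + (i : Int), 0) 0 else 0)).sum
        else 0 := by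
  unfold nextA
  rw [getD_buildF]
  simp only [Std.HashMap.getD_empty, zero_add]
  by_cases hr : b ≤ n
  · rw [sum_toList_eq d (fun s => (List.count ((r : Int), b, 1, (1 : Int)) (movesA n s) : Int))
        ((List.range M).map (fun (i : Nat) => ((r : Int), b - 1, 1 + (i : Int), (0 : Int))))
        ?nod ?cov]
    case nod =>
      refine List.Nodup.map ?_ List.nodup_range
      intro i j hij
      simp only [Prod.mk.injEq] at hij
      omega
    case cov =>
      intro s hs hf
      have hmem : (r, b, 1, 1) ∈ movesA n s := by
        by_contra hc
        apply hf
        show (List.count ((r : Int), b, 1, (1 : Int)) (movesA n s) : Int) = 0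
        simp [List.count_eq_zero.2 hc]
      obtain ⟨hl1, hlM, hc01⟩ := hshape s hs
      obtain ⟨r', b', l', c'⟩ := s
      simp only at hl1 hlM hc01
      rcases mem_movesA hmem with h | h | h | h
      · exfalso
        obtain ⟨h1, h2, h3⟩ := h
        simp only [Prod.mk.injEq] at h3
        omega
      · exfalso
        obtain ⟨h1, h2, h3, h4⟩ := h
        simp only [Prod.mk.injEq] at h4
        omega
      · exfalso
        obtain ⟨h1, h2, h3⟩ := h
        simp only [Prod.mk.injEq] at h3
        omega
      · obtain ⟨h1, h2, h3, h4⟩ := h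
        simp only at h1
        simp only [Prod.mk.injEq] at h4
        simp only [List.mem_map, List.mem_range]
        refine ⟨(l' - 1).toNat, by omega, ?_⟩
        simp only [Prod.mk.injEq]
        omega
    · rw [List.map_map, if_pos hr]
      refine congrArg List.sum (List.map_congr_left ?_)
      intro i hi
      simp only [List.mem_range] at hi
      simp only [Function.comp_apply]
      have hcnt : (movesA n (r, b - 1, 1 + (i : Int), 0)).count (r, b, 1, 1)
          = if 1 + (i : Int) ≠ 2 then 1 else 0 := by
        simp only [movesA, List.count_append]
        have h1 : b - 1 + 1 = b := by ring
        rw [h1]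
        split_ifs <;> simp_all [Prod.mk.injEq]
      rw [hcnt]
      split_ifs <;> simp
  · rw [List.sum_eq_zero, if_neg hr]
    intro x hx
    simp only [List.mem_map] at hx
    obtain ⟨sv, hsv, rfl⟩ := hx
    have : (movesA n sv.1).count (r, b, 1, 1) = 0 := by
      rw [List.count_eq_zero]
      intro hmem
      rcases mem_movesA hmem with ⟨h1, h2, h3⟩ | ⟨h1, h2, h3, h4⟩ | ⟨h1, h2, h3⟩ | ⟨h1, h2, h3, h4⟩ <;>
        simp [Prod.mk.injEq] at * <;> omega
    simp [this]

-- sum of color-c counts over run lengths ≥ 3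
def SA (d : Std.HashMap (Int × Int × Int × Int) Int) (r b c : Int) (M : Nat) : Int :=
  ((List.range M).map (fun (i : Nat) => d.getD (r, b, 3 + (i : Int), c) 0)).sum

-- A's DP after j loop iterations (j+1 cards placed)
def DA (n : Int) : Nat → Std.HashMap (Int × Int × Int × Int) Int
  | 0 => ((∅ : Std.HashMap (Int × Int × Int × Int) Int).insert (1, 0, 1, 0) 1).insert (0, 1, 1, 1) 1
  | (j + 1) => nextA n (DA n j)

-- invariant of A's DP: the shape of every reachable state
def AInv (n : Int) (j : Nat) : Prop :=
  ∀ s ∈ DA n j,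
    1 ≤ s.2.2.1 ∧ s.2.2.1 ≤ (j : Int) + 1 ∧ (s.2.2.2 = 0 ∨ s.2.2.2 = 1) ∧
    0 ≤ s.1 ∧ s.1 ≤ n ∧ 0 ≤ s.2.1 ∧ s.2.1 ≤ n ∧ s.1 + s.2.1 = (j : Int) + 1

-- sum helpers
theorem switch_sum (g : Int → Int) (K : Nat) (hK : 1 ≤ K) :
    ((List.range K).map (fun (i : Nat) => if 1 + (i : Int) ≠ 2 then g (1 + (i : Int)) else 0)).sum
      = g 1 + ((List.range (K - 2)).map (fun (i : Nat) => g (3 + (i : Int)))).sum := by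
  induction K with
  | zero => omega
  | succ K ih =>
    rcases Nat.lt_or_ge K 2 with hK2 | hK2
    · interval_cases K <;> simp [List.range_succ]
    · rw [List.range_succ, List.map_append, List.sum_append, ih (by omega)]
      have h1 : K + 1 - 2 = (K - 2) + 1 := by omega
      rw [h1, List.range_succ, List.map_append, List.sum_append]
      have h2 : (3 : Int) + ((K - 2 : Nat) : Int) = 1 + (K : Int) := by
        omega
      have h3 : (1 : Int) + (K : Int) ≠ 2 := by omega
      simp [h2, h3]
      ring

theorem ext_sum (g : Int → Int) (K : Nat) :
    ((List.range (K + 1)).map (fun (i : Nat) => g (2 + (i : Int)))).sum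
      = g 2 + ((List.range K).map (fun (i : Nat) => g (3 + (i : Int)))).sum := by
  rw [List.range_succ_eq_map, List.map_cons, List.sum_cons, List.map_map]
  norm_num
  refine congrArg List.sum (List.map_congr_left ?_)
  intro i _
  simp only [Function.comp_apply]
  have : (2 : Int) + ((i + 1 : Nat) : Int) = 3 + (i : Int) := by push_cast; ring
  rw [this]

theorem SA_truncate (d : Std.HashMap (Int × Int × Int × Int) Int) (r b c : Int) (K M : Nat)
    (hKM : K ≤ M) (hv : ∀ i : Nat, K ≤ i → d.getD (r, b, 3 + (i : Int), c) 0 = 0) :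
    SA d r b c M = SA d r b c K := by
  induction M with
  | zero =>
    have : K = 0 := by omega
    rw [this]
  | succ M ih =>
    rcases Nat.lt_or_ge K (M + 1) with h | h
    · have : K ≤ M := by omega
      rw [← ih this]
      unfold SA
      rw [List.range_succ, List.map_append, List.sum_append]
      simp [hv M (by omega)]
    · have : K = M + 1 := by omega
      rw [this]

-- a state outside the invariant's shape carries count 0
theorem getD_vanishA (n : Int) (j : Nat) (h : AInv n j) (r b l c : Int)
    (hout : ¬ (1 ≤ l ∧ l ≤ (j : Int) + 1 ∧ (c = 0 ∨ c = 1) ∧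
               0 ≤ r ∧ r ≤ n ∧ 0 ≤ b ∧ b ≤ n ∧ r + b = (j : Int) + 1)) :
    (DA n j).getD (r, b, l, c) 0 = 0 := by
  by_cases hmem : (r, b, l, c) ∈ DA n j
  · have := h _ hmem
    simp only at this
    exact absurd this hout
  · exact Std.HashMap.getD_eq_fallback hmem

theorem AInv_step (n : Int) (j : Nat) (h : AInv n j) : AInv n (j + 1) := by
  intro s hs
  have hDA : DA n (j + 1) = nextA n (DA n j) := rfl
  rw [hDA] at hs
  unfold nextA at hs
  rw [mem_buildF] at hs
  rcases hs with hs | ⟨sv, hsv, hm⟩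
  · exact absurd hs (Std.HashMap.not_mem_empty)
  · have hk : sv.1 ∈ DA n j := fst_mem_of_mem_toList hsv
    obtain ⟨⟨r', b', l', c'⟩, v⟩ := sv
    have hsh' := h _ hk
    simp only at hsh'
    push_cast
    rcases mem_movesA hm with ⟨h1, h2, h3⟩ | ⟨h1, h2, h3, h4⟩ | ⟨h1, h2, h3⟩ | ⟨h1, h2, h3, h4⟩ <;>
      subst_vars <;> simp_all <;> omega

theorem AInv_base (n : Int) (hn : 1 ≤ n) : AInv n 0 := by
  intro s hs
  have : s = (0, 1, 1, 1) ∨ s = (1, 0, 1, 0) := by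
    show s = (0, 1, 1, 1) ∨ s = (1, 0, 1, 0)
    have hm : s ∈ (((∅ : Std.HashMap (Int × Int × Int × Int) Int).insert
        (1, 0, 1, 0) 1).insert (0, 1, 1, 1) 1) := hs
    rw [Std.HashMap.mem_insert, Std.HashMap.mem_insert] at hm
    rcases hm with hm | hm | hm
    · exact Or.inl (eq_of_beq hm).symm
    · exact Or.inr (eq_of_beq hm).symm
    · exact absurd hm (Std.HashMap.not_mem_empty)
  rcases this with rfl | rfl <;> norm_num <;> omega

theorem AInv_all (n : Int) (hn : 1 ≤ n) (m : Nat) : AInv n m := by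
  induction m with
  | zero => exact AInv_base n hn
  | succ m ih => exact AInv_step n m ih

-- red/black symmetry of A's DP
theorem symA (n : Int) (hn : 1 ≤ n) (j : Nat) :
    ∀ r b l : Int, (DA n j).getD (r, b, l, 0) 0 = (DA n j).getD (b, r, l, 1) 0 := by
  induction j with
  | zero =>
    intro r b l
    rw [show DA n 0 = (((∅ : Std.HashMap (Int × Int × Int × Int) Int).insert
          (1, 0, 1, 0) 1).insert (0, 1, 1, 1) 1) from rfl]
    rw [Std.HashMap.getD_insert, Std.HashMap.getD_insert,
        Std.HashMap.getD_insert, Std.HashMap.getD_insert]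
    simp only [Std.HashMap.getD_empty, beq_iff_eq, Prod.mk.injEq, and_true]
    split_ifs <;> omega
  | succ j ih =>
    intro r b l
    have hsh := AInv_all n hn j
    have hshM : ∀ s ∈ DA n j,
        1 ≤ s.2.2.1 ∧ s.2.2.1 ≤ ((j + 1 : Nat) : Int) ∧ (s.2.2.2 = 0 ∨ s.2.2.2 = 1) := by
      intro s hs
      obtain ⟨h1, h2, h3, _⟩ := hsh s hs
      exact ⟨h1, by push_cast; omega, h3⟩
    have hDA : DA n (j + 1) = nextA n (DA n j) := rfl
    rcases lt_or_ge l 1 with hl | hl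
    · rw [getD_vanishA n (j + 1) (AInv_step n j hsh) r b l 0 (by push_cast; omega),
          getD_vanishA n (j + 1) (AInv_step n j hsh) b r l 1 (by push_cast; omega)]
    · rcases eq_or_lt_of_le hl with hl1 | hl2
      · -- l = 1: the switch recurrences
        rw [← hl1, hDA, recA_sw0 n _ (j + 1) hshM r b, recA_sw1 n _ (j + 1) hshM b r]
        split_ifs with hr
        · refine congrArg List.sum (List.map_congr_left ?_)
          intro i _
          split_ifs with ht
          · exact (ih (b) (r - 1) (1 + (i : Int))).symm ▸ (ih (b) (r - 1) (1 + (i : Int))) ▸ rfl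
          · rfl
        · rfl
      · -- 2 ≤ l: the extend recurrences
        rw [hDA, recA_ext0 n _ r b l (by omega), recA_ext1 n _ b r l (by omega)]
        split_ifs with hr
        · exact ih (r - 1) b (l - 1)
        · rfl

-- B's state after j loop iterations
def FB (n : Int) : Nat → (List Int × List Int × List Int)
  | 0 => ((bRange n).map (fun r => if r = 1 then (1 : Int) else 0),
          List.replicate (n + 1).toNat (0 : Int),
          List.replicate (n + 1).toNat (0 : Int))
  | (j + 1) => bStep n ((j : Int) + 1) (FB n j)

theorem bGet_map (n : Int) (g : Int → Int) (i : Int) :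
    bGet n ((bRange n).map g) i = if 0 ≤ i ∧ i ≤ n then g i else 0 := by
  unfold bGet bRange
  split_ifs with h
  · exact PySem.List.pyGetD_map_pyRange_of_nonneg g (n + 1) i 0 h.1 (by omega)
  · rfl

theorem bGet_replicate (n : Int) (i : Int) :
    bGet n (List.replicate (n + 1).toNat (0 : Int)) i = 0 := by
  unfold bGet
  split_ifs with h
  · rw [PySem.List.pyGetD_eq_getElem _ _ h.1 (by rw [List.length_replicate]; omega)]
    simp
  · rfl

-- the correspondence: B's arrays hold A's color-0 counts at run-length classes 1, 2, ≥3
def BInv (n : Int) (j : Nat) : Prop :=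
  ∀ i : Int,
    bGet n (FB n j).1 i = (DA n j).getD (i, (j : Int) + 1 - i, 1, 0) 0 ∧
    bGet n (FB n j).2.1 i = (DA n j).getD (i, (j : Int) + 1 - i, 2, 0) 0 ∧
    bGet n (FB n j).2.2 i = SA (DA n j) i ((j : Int) + 1 - i) 0 (j + 1)

theorem BInv_base (n : Int) (hn : 1 ≤ n) : BInv n 0 := by
  intro i
  have hD0 : DA n 0 = (((∅ : Std.HashMap (Int × Int × Int × Int) Int).insert
      (1, 0, 1, 0) 1).insert (0, 1, 1, 1) 1) := rfl
  refine ⟨?_, ?_, ?_⟩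
  · rw [show (FB n 0).1 = (bRange n).map (fun r => if r = 1 then (1 : Int) else 0) from rfl,
        bGet_map, hD0, Std.HashMap.getD_insert, Std.HashMap.getD_insert]
    simp only [Std.HashMap.getD_empty, beq_iff_eq, Prod.mk.injEq, Nat.cast_zero, and_true]
    split_ifs <;> omega
  · rw [show (FB n 0).2.1 = List.replicate (n + 1).toNat (0 : Int) from rfl, bGet_replicate,
        hD0, Std.HashMap.getD_insert, Std.HashMap.getD_insert]
    simp only [Std.HashMap.getD_empty, beq_iff_eq, Prod.mk.injEq, Nat.cast_zero, and_true]
    split_ifs <;> omega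
  · rw [show (FB n 0).2.2 = List.replicate (n + 1).toNat (0 : Int) from rfl, bGet_replicate]
    symm
    unfold SA
    rw [List.sum_eq_zero]
    intro x hx
    simp only [List.mem_map] at hx
    obtain ⟨t, -, rfl⟩ := hx
    rw [hD0, Std.HashMap.getD_insert, Std.HashMap.getD_insert]
    simp only [Std.HashMap.getD_empty, beq_iff_eq, Prod.mk.injEq, and_true]
    split_ifs <;> omega

theorem BInv_step (n : Int) (hn : 1 ≤ n) (j : Nat) (ih : BInv n j) : BInv n (j + 1) := by
  have hsh := AInv_all n hn j
  have hinv1 : AInv n (j + 1) := AInv_all n hn (j + 1)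
  have hshM : ∀ s ∈ DA n j,
      1 ≤ s.2.2.1 ∧ s.2.2.1 ≤ ((j + 1 : Nat) : Int) ∧ (s.2.2.2 = 0 ∨ s.2.2.2 = 1) := by
    intro s hs
    obtain ⟨h1, h2, h3, _⟩ := hsh s hs
    exact ⟨h1, by push_cast; omega, h3⟩
  have hDA : DA n (j + 1) = nextA n (DA n j) := rfl
  have hvan : ∀ r b l c : Int,
      ¬ (1 ≤ l ∧ l ≤ (j : Int) + 1 ∧ (c = 0 ∨ c = 1) ∧
         0 ≤ r ∧ r ≤ n ∧ 0 ≤ b ∧ b ≤ n ∧ r + b = (j : Int) + 1) →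
      (DA n j).getD (r, b, l, c) 0 = 0 := getD_vanishA n j hsh
  intro i
  have hF1 : (FB n (j + 1)).1
      = (bRange n).map (fun r => bGet n (FB n j).1 (((j : Int) + 1) - r + 1)
          + bGet n (FB n j).2.2 (((j : Int) + 1) - r + 1)) := rfl
  have hF2 : (FB n (j + 1)).2.1
      = (bRange n).map (fun r => bGet n (FB n j).1 (r - 1)) := rfl
  have hF3 : (FB n (j + 1)).2.2
      = (bRange n).map (fun r => bGet n (FB n j).2.1 (r - 1)
          + bGet n (FB n j).2.2 (r - 1)) := rfl
  have hk1 : (((j + 1 : Nat)) : Int) + 1 - i = (j : Int) + 2 - i := by push_cast; ring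
  have hsym1 : ∀ l : Int, (DA n j).getD (i - 1, (j : Int) + 2 - i, l, 1) 0
      = (DA n j).getD ((j : Int) + 2 - i, i - 1, l, 0) 0 := by
    intro l
    exact (symA n hn j ((j : Int) + 2 - i) (i - 1) l).symm
  refine ⟨?_, ?_, ?_⟩
  · -- class-1 array: the switch move
    rw [hF1, bGet_map, hk1]
    by_cases h : 0 ≤ i ∧ i ≤ n
    · rw [if_pos h, hDA, recA_sw0 n _ (j + 1) hshM i ((j : Int) + 2 - i), if_pos h.2,
          switch_sum (fun l => (DA n j).getD (i - 1, (j : Int) + 2 - i, l, 1) 0) (j + 1)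
            (by omega)]
      have e1 : ((j : Int) + 1) - i + 1 = (j : Int) + 2 - i := by ring
      rw [e1]
      obtain ⟨ih1, -, ih3⟩ := ih ((j : Int) + 2 - i)
      rw [show (j : Int) + 1 - ((j : Int) + 2 - i) = i - 1 from by ring] at ih1 ih3
      rw [ih1, ih3]
      have hplus : SA (DA n j) ((j : Int) + 2 - i) (i - 1) 0 (j + 1)
          = ((List.range (j + 1 - 2)).map
              (fun (t : Nat) => (DA n j).getD (i - 1, (j : Int) + 2 - i, 3 + (t : Int), 1) 0)).sum := by
        rw [SA_truncate (DA n j) ((j : Int) + 2 - i) (i - 1) 0 (j + 1 - 2) (j + 1) (by omega)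
              (by intro t ht; apply hvan; push_cast; omega)]
        unfold SA
        refine congrArg List.sum (List.map_congr_left ?_)
        intro t _
        exact (hsym1 (3 + (t : Int))).symm
      rw [hplus, hsym1 1]
    · rw [if_neg h]
      exact (getD_vanishA n (j + 1) hinv1 i ((j : Int) + 2 - i) 1 0 (by push_cast; omega)).symm
  · -- class-2 array: extend a run of class 1
    rw [hF2, bGet_map, hk1]
    by_cases h : 0 ≤ i ∧ i ≤ n
    · rw [if_pos h, hDA, recA_ext0 n _ i ((j : Int) + 2 - i) 2 (by norm_num), if_pos h.2]
      obtain ⟨ih1, -, -⟩ := ih (i - 1)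
      rw [show (j : Int) + 1 - (i - 1) = (j : Int) + 2 - i from by ring] at ih1
      rw [ih1]
      norm_num
    · rw [if_neg h]
      exact (getD_vanishA n (j + 1) hinv1 i ((j : Int) + 2 - i) 2 0 (by push_cast; omega)).symm
  · -- class-≥3 array: extend a run of class 2 or ≥3
    rw [hF3, bGet_map, hk1]
    by_cases h : 0 ≤ i ∧ i ≤ n
    · have hSA : SA (DA n (j + 1)) i ((j : Int) + 2 - i) 0 ((j + 1) + 1)
          = ((List.range ((j + 1) + 1)).map (fun (t : Nat) =>
              (DA n j).getD (i - 1, (j : Int) + 2 - i, 2 + (t : Int), 0) 0)).sum := by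
        unfold SA
        rw [List.map_congr_left (fun (t : Nat) (_ : t ∈ List.range ((j + 1) + 1)) => by
          rw [hDA, recA_ext0 n _ i ((j : Int) + 2 - i) (3 + (t : Int)) (by omega),
              if_pos h.2, show (3 : Int) + (t : Int) - 1 = 2 + (t : Int) from by ring])]
      rw [if_pos h, hSA,
          ext_sum (fun l => (DA n j).getD (i - 1, (j : Int) + 2 - i, l, 0) 0) (j + 1)]
      obtain ⟨-, ih2, ih3⟩ := ih (i - 1)
      rw [show (j : Int) + 1 - (i - 1) = (j : Int) + 2 - i from by ring] at ih2 ih3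
      rw [ih2, ih3]
      rfl
    · rw [if_neg h]
      symm
      unfold SA
      rw [List.sum_eq_zero]
      intro x hx
      simp only [List.mem_map] at hx
      obtain ⟨t, -, rfl⟩ := hx
      exact getD_vanishA n (j + 1) hinv1 i ((j : Int) + 2 - i) (3 + (t : Int)) 0
        (by push_cast; omega)

theorem BInv_all (n : Int) (hn : 1 ≤ n) (m : Nat) : BInv n m := by
  induction m with
  | zero => exact BInv_base n hn
  | succ m ih => exact BInv_step n hn m ih

theorem foldA (n : Int) (m : Nat) :
    ((List.range m).map (fun (k : Nat) => (1 : Int) + k)).foldl (fun dp _ => stepA n dp)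
      (((∅ : Std.HashMap (Int × Int × Int × Int) Int).insert
        (1, 0, 1, 0) 1).insert (0, 1, 1, 1) 1) = DA n m := by
  induction m with
  | zero => rfl
  | succ m ih =>
    rw [List.range_succ, List.map_append, List.foldl_append, ih]
    simp only [List.map_cons, List.map_nil, List.foldl_cons, List.foldl_nil]
    rw [stepA_eq]
    rfl

theorem foldB (n : Int) (m : Nat) :
    ((List.range m).map (fun (k : Nat) => (1 : Int) + k)).foldl (fun f k => bStep n k f)
      ((bRange n).map (fun r => if r = 1 then (1 : Int) else 0),
       List.replicate (n + 1).toNat (0 : Int),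
       List.replicate (n + 1).toNat (0 : Int)) = FB n m := by
  induction m with
  | zero => rfl
  | succ m ih =>
    rw [List.range_succ, List.map_append, List.foldl_append, ih]
    simp only [List.map_cons, List.map_nil, List.foldl_cons, List.foldl_nil]
    have h1 : (1 : Int) + (m : Int) = (m : Int) + 1 := by ring
    rw [h1]
    rfl

theorem badA_eq (n : Int) (hn : 1 ≤ n) (m : Nat) :
    (DA n m).toList.foldl (fun acc sv =>
        if sv.1.1 = n ∧ sv.1.2.1 = n then
          if sv.1.2.2.1 ≠ 2 then acc + sv.2 else acc
        else acc) 0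
      = (DA n m).getD (n, n, 1, 0) 0 + (DA n m).getD (n, n, 1, 1) 0
        + SA (DA n m) n n 0 m + SA (DA n m) n n 1 m := by
  have hsA := AInv_all n hn m
  rw [PySem.List.foldl_congr_mem _ _
    (fun acc sv => acc +
      (if (sv.1.1 = n ∧ sv.1.2.1 = n) ∧ sv.1.2.2.1 ≠ 2 then (1 : Int) else 0) * sv.2) _
    (by intro acc sv _; split_ifs <;> simp_all)]
  have hadd := PySem.List.foldl_add ((DA n m).toList)
    (fun sv => (if (sv.1.1 = n ∧ sv.1.2.1 = n) ∧ sv.1.2.2.1 ≠ 2 then (1 : Int) else 0) * sv.2) 0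
  rw [hadd, zero_add]
  rw [sum_toList_eq (DA n m)
    (fun s => if (s.1 = n ∧ s.2.1 = n) ∧ s.2.2.1 ≠ 2 then (1 : Int) else 0)
    ([(n, n, 1, 0), (n, n, 1, 1)]
      ++ (List.range m).map (fun (i : Nat) => ((n : Int), (n : Int), 3 + (i : Int), (0 : Int)))
      ++ (List.range m).map (fun (i : Nat) => ((n : Int), (n : Int), 3 + (i : Int), (1 : Int))))
    ?nod ?cov]
  case nod =>
    have hmap : ∀ c : Int,
        ((List.range m).map (fun (i : Nat) => ((n : Int), (n : Int), 3 + (i : Int), c))).Nodup := by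
      intro c
      refine List.Nodup.map ?_ List.nodup_range
      intro i j hij
      simp only [Prod.mk.injEq] at hij
      omega
    refine List.Nodup.append (List.Nodup.append ?_ (hmap 0) ?_) (hmap 1) ?_
    · simp
    · intro x hx1 hx2
      simp only [List.mem_cons, List.not_mem_nil, or_false] at hx1
      simp only [List.mem_map, List.mem_range] at hx2
      obtain ⟨i, hi, heq⟩ := hx2
      rcases hx1 with rfl | rfl <;> simp only [Prod.mk.injEq] at heq <;> omega
    · intro x hx1 hx2
      simp only [List.mem_append, List.mem_cons, List.not_mem_nil, or_false,
        List.mem_map, List.mem_range] at hx1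
      simp only [List.mem_map, List.mem_range] at hx2
      obtain ⟨i, hi, heq⟩ := hx2
      rcases hx1 with (rfl | rfl) | ⟨i', hi', heq'⟩
      · simp only [Prod.mk.injEq] at heq; omega
      · simp only [Prod.mk.injEq] at heq; omega
      · rw [← heq] at heq'
        simp only [Prod.mk.injEq] at heq'
        omega
  case cov =>
    intro s hs hf
    obtain ⟨h1, h2, h3, _⟩ := hsA s hs
    obtain ⟨r', b', l', c'⟩ := s
    simp only at h1 h2 h3
    by_cases h : (r' = n ∧ b' = n) ∧ l' ≠ 2
    · simp only [List.mem_append, List.mem_cons, List.not_mem_nil, or_false, List.mem_map,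
        List.mem_range, Prod.mk.injEq]
      rcases h3 with rfl | rfl
      · by_cases hl : l' = 1
        · left; left; omega
        · left; right
          exact ⟨(l' - 3).toNat, by omega, by omega, by omega, by omega⟩
      · by_cases hl : l' = 1
        · left; left; omega
        · right
          exact ⟨(l' - 3).toNat, by omega, by omega, by omega, by omega⟩
    · exfalso; apply hf; simp [h]
  · have h3x : ∀ i : Nat, ((3 : Int) + (i : Int) ≠ 2) := by intro i; omega
    simp only [List.map_append, List.sum_append, List.map_map, List.map_cons, List.map_nil,
      List.sum_cons, List.sum_nil, ite_mul, one_mul, zero_mul, ne_eq]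
    have hsum : ∀ c : Int,
        (List.map ((fun s => if (s.1 = n ∧ s.2.1 = n) ∧ ¬s.2.2.1 = 2 then (DA n m).getD s 0 else 0)
            ∘ (fun (i : Nat) => ((n : Int), (n : Int), 3 + (i : Int), c))) (List.range m)).sum
          = SA (DA n m) n n c m := by
      intro c
      unfold SA
      refine congrArg List.sum (List.map_congr_left ?_)
      intro i _
      simp [h3x i]
    rw [hsum 0, hsum 1]
    norm_num

theorem solve_eq_alt (n : Int) (hn : 1 ≤ n) : solve n = solve_alt n := by
  unfold solve solve_alt
  simp only []
  rw [PySem.List.pyRange_one]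
  set m : Nat := (2 * n - 1).toNat with hm
  rw [foldA n m, foldB n m, badA_eq n hn m]
  have hmi : ((m : Nat) : Int) = 2 * n - 1 := Int.toNat_of_nonneg (by omega)
  have hsA := AInv_all n hn m
  obtain ⟨h1, _, h3⟩ := BInv_all n hn m n
  have hb : ((m : Nat) : Int) + 1 - n = n := by omega
  rw [hb] at h1 h3
  rw [h1, h3]
  have hsym1 : (DA n m).getD (n, n, 1, 1) 0 = (DA n m).getD (n, n, 1, 0) 0 :=
    (symA n hn m n n 1).symm
  have hsymS : SA (DA n m) n n 1 m = SA (DA n m) n n 0 m := by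
    unfold SA
    refine congrArg List.sum (List.map_congr_left ?_)
    intro t _
    exact (symA n hn m n n (3 + (t : Int))).symm
  have htr : SA (DA n m) n n 0 (m + 1) = SA (DA n m) n n 0 m := by
    apply SA_truncate _ _ _ _ _ _ (by omega)
    intro t ht
    apply getD_vanishA n m hsA
    omega
  rw [hsym1, hsymS, htr]
  ring

-- n = 0: A's loop body never runs and the two seed states fail the final filter
theorem solve_zero : solve 0 = 1 := by
  unfold solve
  simp only []
  rw [PySem.List.pyRange_one_eq_nil (by norm_num), List.foldl_nil]
  rw [PySem.List.foldl_congr_mem _ _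
    (fun acc sv => acc +
      (if (sv.1.1 = (0 : Int) ∧ sv.1.2.1 = (0 : Int)) ∧ sv.1.2.2.1 ≠ 2 then (1 : Int) else 0)
        * sv.2) _
    (by intro acc sv _; split_ifs <;> simp_all)]
  rw [PySem.List.foldl_add _ _ 0, zero_add]
  rw [sum_toList_eq (((∅ : Std.HashMap (Int × Int × Int × Int) Int).insert
      (1, 0, 1, 0) 1).insert (0, 1, 1, 1) 1)
    (fun s => if (s.1 = (0 : Int) ∧ s.2.1 = (0 : Int)) ∧ s.2.2.1 ≠ 2 then (1 : Int) else 0)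
    [] (by simp) ?cov]
  case cov =>
    intro s hs hf
    exfalso
    rw [Std.HashMap.mem_insert, Std.HashMap.mem_insert] at hs
    rcases hs with hm | hm | hm
    · have hse := (eq_of_beq hm).symm; subst hse; simp at hf
    · have hse := (eq_of_beq hm).symm; subst hse; simp at hf
    · exact Std.HashMap.not_mem_empty hm
  · simp
    decide

-- ===== VERDICT (by name: the statement is the Claim_ definition above) =====
theorem solve_spec : Claim_equal_solve := by
  intro n _ hpre
  unfold Spec_solve
  rcases eq_or_lt_of_le hpre with h0 | h1
  · rw [← h0, solve_zero]
    decide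
  · exact solve_eq_alt n (by omega)
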